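-- pv_equiv track=rewrite | github.com/t-0hmura/pdb2reaction | pdb2reaction/utils.py | collect_option_values
-- ===== SOURCE A (Python) =====
-- from typing import Any, Dict, Optional, Sequence, List, Tuple, Callable, Iterator
--
-- def collect_option_values(argv: Sequence[str], names: Sequence[str]) -> List[str]:
--     """
--     Collect values following a flag that may appear once with multiple space-separated values,
--     e.g., "-i A B C".
--     """
--     vals: List[str] = []
--     i = 0
--     while i < len(argv):
--         tok = argv[i]
--         if tok in names:
--             j = i + 1
--             while j < len(argv) and not argv[j].startswith("-"):
--                 vals.append(argv[j])
--                 j += 1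
--             i = j
--         else:
--             i += 1
--     return vals
-- ===== SOURCE B (Python) =====
-- def collect_option_values(argv, names):
--     vals = []
--     collecting = False
--     for tok in argv:
--         if collecting and not tok.startswith("-"):
--             vals.append(tok)
--         else:
--             collecting = tok in names
--     return vals
-- ===== Notes on version B (the rewrite author's own statement) =====
-- stated objective: simpler
-- what changed: Replaces A's nested index-jumping while loops with a single linear pass carrying a boolean 'collecting' flag that appends non-dash tokens after a matched flag.
import Mathlib
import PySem

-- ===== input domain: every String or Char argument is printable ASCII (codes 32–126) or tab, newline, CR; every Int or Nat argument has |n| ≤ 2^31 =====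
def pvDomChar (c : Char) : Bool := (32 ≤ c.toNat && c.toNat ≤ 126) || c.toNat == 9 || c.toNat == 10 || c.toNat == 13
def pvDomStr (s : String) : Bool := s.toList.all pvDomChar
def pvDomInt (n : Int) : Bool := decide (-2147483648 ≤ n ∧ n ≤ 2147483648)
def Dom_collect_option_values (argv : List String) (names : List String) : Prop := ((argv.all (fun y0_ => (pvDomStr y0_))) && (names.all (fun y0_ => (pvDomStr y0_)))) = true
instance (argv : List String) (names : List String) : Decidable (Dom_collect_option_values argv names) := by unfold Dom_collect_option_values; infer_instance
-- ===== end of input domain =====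

-- B replaces A's nested index-jumping loops with a single fold carrying a boolean "collecting" flag (objective: simpler).

-- ===== PORT A =====
-- inner 'while j < len(argv) and not argv[j].startswith("-")' loop of A
def pvInnerA (argv : List String) (vals : List String) (j : Nat) : Nat × List String :=
  if h : j < argv.length then
    if PySem.Str.startswith argv[j] "-" then (j, vals)
    else pvInnerA argv (vals ++ [argv[j]]) (j + 1)
  else (j, vals)
termination_by argv.length - j

-- needed by outerA's termination
theorem pvInnerA_ge (argv vals : List String) (j : Nat) : j ≤ (pvInnerA argv vals j).1 := by
  fun_induction pvInnerA argv vals j with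
  | case1 => simp
  | case2 vals j h hd ih => omega
  | case3 => simp

-- outer 'while i < len(argv)' loop of A
def pvOuterA (argv names : List String) (vals : List String) (i : Nat) : List String :=
  if h : i < argv.length then
    if names.contains argv[i] then
      let p := pvInnerA argv vals (i + 1)
      pvOuterA argv names p.2 p.1
    else pvOuterA argv names vals (i + 1)
  else vals
termination_by argv.length - i
decreasing_by
  · have := pvInnerA_ge argv vals (i + 1); omega
  · omega

def collect_option_values (argv : List String) (names : List String) : List String :=
  pvOuterA argv names [] 0

-- ===== PORT B =====
-- one step of B's single pass: append when collecting and not a dash token, else reset the flag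
def pvStepB (names : List String) (st : Bool × List String) (tok : String) : Bool × List String :=
  if st.1 && !(PySem.Str.startswith tok "-") then (st.1, st.2 ++ [tok])
  else (names.contains tok, st.2)

def collect_option_values_alt (argv : List String) (names : List String) : List String :=
  (argv.foldl (pvStepB names) (false, [])).2

-- ===== PRECONDITION & SPEC =====
def Spec_collect_option_values (argv : List String) (names : List String) (out : List String) : Prop := out = collect_option_values_alt argv names
instance (argv : List String) (names : List String) (out : List String) : Decidable (Spec_collect_option_values argv names out) := by unfold Spec_collect_option_values; infer_instance

-- ===== CLAIM (what is proved, stated in full; the proofs are below) =====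
def Claim_equal_collect_option_values : Prop := ∀ (argv : List String) (names : List String), Dom_collect_option_values argv names → Spec_collect_option_values argv names (collect_option_values argv names)

-- ===== LEMMAS AND PROOFS =====

theorem pvStepB_false (names vals : List String) (tok : String) :
    pvStepB names (false, vals) tok = (names.contains tok, vals) := by
  simp [pvStepB]

theorem pvStepB_true_dash (names vals : List String) (tok : String)
    (hd : PySem.Str.startswith tok "-" = true) :
    pvStepB names (true, vals) tok = (names.contains tok, vals) := by
  unfold pvStepB; rw [hd]; simp

theorem pvStepB_true_nodash (names vals : List String) (tok : String)
    (hd : PySem.Str.startswith tok "-" = false) :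
    pvStepB names (true, vals) tok = (true, vals ++ [tok]) := by
  unfold pvStepB; rw [hd]; simp

-- Both loop nests of A, from position i, compute B's fold over the remaining suffix:
-- the outer loop corresponds to collecting = false, and (outer resumed after inner) to collecting = true.
theorem pvMain (argv names : List String) :
    ∀ n i vals, argv.length - i = n →
      (pvOuterA argv names vals i = (List.foldl (pvStepB names) (false, vals) (argv.drop i)).2 ∧
       pvOuterA argv names (pvInnerA argv vals i).2 (pvInnerA argv vals i).1
         = (List.foldl (pvStepB names) (true, vals) (argv.drop i)).2) := by
  intro n
  induction n with
  | zero =>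
    intro i vals h
    have hge : argv.length ≤ i := by omega
    rw [List.drop_eq_nil_of_le hge]
    unfold pvInnerA
    rw [dif_neg (by omega)]
    constructor <;> (unfold pvOuterA; rw [dif_neg (by omega)]; rfl)
  | succ n ih =>
    intro i vals h
    by_cases hlt : i < argv.length
    · rw [List.drop_eq_getElem_cons hlt]
      have hstep : argv.length - (i + 1) = n := by omega
      constructor
      · unfold pvOuterA
        rw [dif_pos hlt]
        by_cases hn : names.contains argv[i]
        · rw [if_pos hn, List.foldl_cons, pvStepB_false, hn]
          exact (ih (i + 1) vals hstep).2
        · have hn' : names.contains argv[i] = false := by simpa using hn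
          rw [if_neg hn, List.foldl_cons, pvStepB_false, hn']
          exact (ih (i + 1) vals hstep).1
      · unfold pvInnerA
        rw [dif_pos hlt]
        by_cases hd : PySem.Str.startswith argv[i] "-"
        · rw [if_pos hd, List.foldl_cons, pvStepB_true_dash _ _ _ hd]
          -- unfold one step of the outer loop at i, then use the IH at i+1
          unfold pvOuterA
          rw [dif_pos hlt]
          by_cases hn : names.contains argv[i]
          · rw [if_pos hn, hn]
            exact (ih (i + 1) vals hstep).2
          · have hn' : names.contains argv[i] = false := by simpa using hn
            rw [if_neg hn, hn']
            exact (ih (i + 1) vals hstep).1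
        · have hd' : PySem.Str.startswith argv[i] "-" = false := by simpa using hd
          rw [if_neg hd, List.foldl_cons, pvStepB_true_nodash _ _ _ hd']
          exact (ih (i + 1) (vals ++ [argv[i]]) hstep).2
    · have hge : argv.length ≤ i := by omega
      rw [List.drop_eq_nil_of_le hge]
      unfold pvInnerA
      rw [dif_neg (by omega)]
      constructor <;> (unfold pvOuterA; rw [dif_neg (by omega)]; rfl)

-- ===== VERDICT (by name: the statement is the Claim_ definition above) =====
theorem collect_option_values_spec : Claim_equal_collect_option_values := by
  intro argv names _
  unfold Spec_collect_option_values collect_option_values collect_option_values_alt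
  simpa using (pvMain argv names (argv.length - 0) 0 [] rfl).1
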